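-- pv_equiv track=rewrite | github.com/aiur-adept/arcana | simulate.py | active_mask_for_field
-- ===== SOURCE A (Python) =====
-- from typing import List, Dict, Tuple, Optional, Any
--
-- def active_mask_for_field(rituals: List[int]) -> List[bool]:
--     n = len(rituals)
--     if n == 0:
--         return []
--     active = [False] * n
--     order = list(range(n))
--     order.sort(key=lambda i: rituals[i])
--     for idx in order:
--         v = rituals[idx]
--         if v == 1:
--             active[idx] = True
--         else:
--             ok = True
--             for k in range(1, v):
--                 found = False
--                 for j in range(n):
--                     if rituals[j] == k and active[j]:
--                         found = True
--                         break
--                 if not found: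
--                     ok = False
--                     break
--             active[idx] = ok
--     return active
-- ===== SOURCE B (Python) =====
-- def active_mask_for_field(rituals):
--     present = set(rituals)
--     mex = 1
--     while mex in present:
--         mex += 1
--     return [v <= mex for v in rituals]
-- ===== Notes on version B (the rewrite author's own statement) =====
-- stated objective: faster
-- what changed: Replaced the sort-then-nested-rescan activation propagation by a single set-based smallest-missing-positive (mex) computation (active iff value <= mex); intended as asymptotically faster (O(n) vs O(n^2*max_value) worst case) and measured: A times out (>3.5s) on inputs where B answers in milliseconds.
import Mathlib
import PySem

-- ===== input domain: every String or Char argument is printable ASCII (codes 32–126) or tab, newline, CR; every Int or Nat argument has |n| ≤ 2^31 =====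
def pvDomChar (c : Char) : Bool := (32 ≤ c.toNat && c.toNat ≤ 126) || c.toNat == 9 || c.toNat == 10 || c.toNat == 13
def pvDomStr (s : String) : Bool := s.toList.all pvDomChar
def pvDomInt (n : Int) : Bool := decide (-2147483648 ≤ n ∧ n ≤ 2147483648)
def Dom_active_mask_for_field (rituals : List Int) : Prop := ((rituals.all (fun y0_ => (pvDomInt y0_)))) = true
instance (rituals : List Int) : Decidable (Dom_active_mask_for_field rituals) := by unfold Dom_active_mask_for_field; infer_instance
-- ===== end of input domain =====

-- B replaces A's sort + nested per-value rescans by one set-based smallest-missing-positive (mex) pass: active iff value ≤ mex.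


-- ===== PORT A =====
-- A's 'for k in range(1, v)' with its 'break': counts k upward, stops at the first k not found (the j-scan with break is ported as any)
def amOk (rituals : List Int) (active : List Bool) (v : Int) (k : Int) : Bool :=
  if h : k < v then
    if (PySem.List.pyRange 0 (rituals.length : Int) 1).any (fun j =>
        PySem.List.pyGetD rituals j 0 == k && PySem.List.pyGetD active j false) then
      amOk rituals active v (k + 1)
    else false
  else true
termination_by (v - k).toNat
decreasing_by omega

-- body of A's loop over the sorted index order
def amStep (rituals : List Int) (active : List Bool) (idx : Int) : List Bool :=
  let v := PySem.List.pyGetD rituals idx 0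
  if v == 1 then PySem.List.pySetD active idx true
  else
    let ok := amOk rituals active v 1
    PySem.List.pySetD active idx ok

def active_mask_for_field (rituals : List Int) : List Bool :=
  if rituals.length = 0 then [] else
  let active := List.replicate rituals.length false
  let order := PySem.List.sorted (PySem.List.pyRange 0 (rituals.length : Int) 1)
      (fun i => PySem.List.pyGetD rituals i 0) false
  order.foldl (amStep rituals) active

-- ===== PORT B =====
-- the 'while mex in present: mex += 1' loop; the fuel |present| + 1 only makes it total (proved sufficient below)
def findMex (s : List Int) (mex : Int) : Nat → Int
  | 0 => mex
  | fuel+1 => if mex ∈ s then findMex s (mex+1) fuel else mex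

def active_mask_for_field_alt (rituals : List Int) : List Bool :=
  let present := PySem.Set.ofList rituals
  let mex := findMex present 1 (present.length + 1)
  rituals.map (fun v => decide (v ≤ mex))

-- ===== PRECONDITION & SPEC =====
def Spec_active_mask_for_field (rituals : List Int) (out : List Bool) : Prop := out = active_mask_for_field_alt rituals
instance (rituals : List Int) (out : List Bool) : Decidable (Spec_active_mask_for_field rituals out) := by unfold Spec_active_mask_for_field; infer_instance

-- ===== CLAIM (what is proved, stated in full; the proofs are below) =====
def Claim_equal_active_mask_for_field : Prop := ∀ (rituals : List Int), Dom_active_mask_for_field rituals → Spec_active_mask_for_field rituals (active_mask_for_field rituals)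

-- ===== LEMMAS AND PROOFS =====

-- the fuel-guarded while loop really finds the smallest m ≥ mex not in s
theorem findMex_spec (s : List Int) (mex : Int) (fuel : Nat)
    (hf : (s.filter (fun x => decide (mex ≤ x))).length < fuel) :
    mex ≤ findMex s mex fuel ∧ findMex s mex fuel ∉ s ∧
      ∀ k, mex ≤ k → k < findMex s mex fuel → k ∈ s := by
  induction fuel generalizing mex with
  | zero => omega
  | succ fuel ih =>
    by_cases hmem : mex ∈ s
    · have hfilter : s.filter (fun x => decide (mex + 1 ≤ x))
          = (s.filter (fun x => decide (mex ≤ x))).filter (fun x => decide (mex + 1 ≤ x)) := by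
        rw [List.filter_filter]
        congr 1; funext x
        by_cases h : mex + 1 ≤ x
        · simp [h]; omega
        · simp [h]
      have hlt : (s.filter (fun x => decide (mex + 1 ≤ x))).length
          < (s.filter (fun x => decide (mex ≤ x))).length := by
        rw [hfilter, List.length_filter_lt_length_iff_exists]
        exact ⟨mex, by simp [hmem], by simp⟩
      have := ih (mex + 1) (by omega)
      simp only [findMex, if_pos hmem]
      refine ⟨by omega, this.2.1, fun k hk1 hk2 => ?_⟩
      rcases eq_or_lt_of_le hk1 with h | h
      · exact h ▸ hmem
      · exact this.2.2 k (by omega) hk2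
    · simp only [findMex, if_neg hmem]
      exact ⟨le_refl _, hmem, fun k h1 h2 => absurd (lt_of_le_of_lt h1 h2) (lt_irrefl _)⟩

-- reading an entry after a write, with Int indices in range
theorem pyGetD_pySetD_int (xs : List Bool) (i j : Int) (v : Bool)
    (hi : 0 ≤ i) (hilen : i < (xs.length : Int)) (hj : 0 ≤ j) :
    PySem.List.pyGetD (PySem.List.pySetD xs i v) j false
      = if j = i then v else PySem.List.pyGetD xs j false := by
  rw [PySem.List.pySetD_of_nonneg xs v hi, PySem.List.pyGetD_of_nonneg _ _ hj,
      PySem.List.pyGetD_of_nonneg _ _ hj]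
  by_cases h : j = i
  · subst h
    have hl : j.toNat < xs.length := by omega
    simp [List.getD, hl]
  · have hne : j.toNat ≠ i.toNat := by omega
    simp [List.getD, hne.symm, h]

-- loop invariant for A's fold: active[i] is set exactly on the processed indices whose value is ≤ m
def INV (rituals : List Int) (m : Int) (done : List Int) (a : List Bool) : Prop :=
  a.length = rituals.length ∧
  ∀ i : Int, 0 ≤ i → i < (rituals.length : Int) →
    (PySem.List.pyGetD a i false = true ↔ (i ∈ done ∧ PySem.List.pyGetD rituals i 0 ≤ m))

-- the break-out k-loop is the conjunction over range(k, v)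
theorem amOk_eq_all (rituals : List Int) (active : List Bool) (v k : Int) :
    amOk rituals active v k = (PySem.List.pyRange k v 1).all (fun k' =>
      (PySem.List.pyRange 0 (rituals.length : Int) 1).any (fun j =>
        PySem.List.pyGetD rituals j 0 == k' && PySem.List.pyGetD active j false)) := by
  by_cases h : k < v
  · rw [amOk, dif_pos h, PySem.List.pyRange_one_cons h, List.all_cons,
        amOk_eq_all rituals active v (k + 1)]
    cases hc : (PySem.List.pyRange 0 (rituals.length : Int) 1).any (fun j =>
        PySem.List.pyGetD rituals j 0 == k && PySem.List.pyGetD active j false) <;> simp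
  · rw [amOk, dif_neg h, PySem.List.pyRange_one_eq_nil (by omega)]
    simp
termination_by (v - k).toNat
decreasing_by omega

theorem step_inv (rituals : List Int) (m : Int)
    (hm1 : 1 ≤ m) (hm2 : m ∉ rituals) (hm3 : ∀ k, 1 ≤ k → k < m → k ∈ rituals)
    (done rest : List Int) (idx : Int)
    (horder : PySem.List.sorted (PySem.List.pyRange 0 (rituals.length : Int) 1)
        (fun i => PySem.List.pyGetD rituals i 0) false = done ++ idx :: rest)
    (a : List Bool) (hinv : INV rituals m done a) :
    INV rituals m (done ++ [idx]) (amStep rituals a idx) := by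
  obtain ⟨hlen, hget⟩ := hinv
  have hperm := PySem.List.sorted_perm (PySem.List.pyRange 0 (rituals.length : Int) 1)
      (fun i => PySem.List.pyGetD rituals i 0) false
  rw [horder] at hperm
  have hpw := PySem.List.sorted_pairwise (PySem.List.pyRange 0 (rituals.length : Int) 1)
      (fun i => PySem.List.pyGetD rituals i 0)
  rw [horder] at hpw
  have hidxmem : idx ∈ PySem.List.pyRange 0 (rituals.length : Int) 1 :=
    hperm.mem_iff.mp (by simp)
  rw [PySem.List.mem_pyRange_one] at hidxmem
  obtain ⟨hidx0, hidxn⟩ := hidxmem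
  -- every index holding a strictly smaller value has been processed already
  have hdone_lt : ∀ j : Int, 0 ≤ j → j < (rituals.length : Int) →
      PySem.List.pyGetD rituals j 0 < PySem.List.pyGetD rituals idx 0 → j ∈ done := by
    intro j hj0 hjn hlt
    have hjmem : j ∈ done ++ idx :: rest :=
      hperm.mem_iff.mpr (PySem.List.mem_pyRange_one.mpr ⟨hj0, hjn⟩)
    rcases List.mem_append.mp hjmem with h | h
    · exact h
    · rcases List.mem_cons.mp h with h | h
      · exact absurd hlt (by rw [h]; exact lt_irrefl _)
      · have := ((List.pairwise_append.mp hpw).2.1)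
        have hle := (List.pairwise_cons.mp this).1 j h
        exact absurd hlt (not_lt.mpr hle)
  set v := PySem.List.pyGetD rituals idx 0 with hv
  -- a value is in rituals iff some in-range index holds it
  have hmemidx : ∀ k : Int, k ∈ rituals ↔ ∃ j : Int, 0 ≤ j ∧ j < (rituals.length : Int) ∧
      PySem.List.pyGetD rituals j 0 = k := by
    intro k
    constructor
    · intro hk
      obtain ⟨j, hjl, hje⟩ := List.mem_iff_getElem.mp hk
      exact ⟨(j : Int), by omega, by omega, by
        rw [PySem.List.pyGetD_of_nonneg _ _ (by omega)]
        simpa [List.getD, List.getElem?_eq_getElem hjl] using hje⟩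
    · rintro ⟨j, hj0, hjn, hje⟩
      rw [PySem.List.pyGetD_of_nonneg _ _ hj0] at hje
      have hjl : j.toNat < rituals.length := by omega
      rw [List.getD, List.getElem?_eq_getElem hjl] at hje
      simp at hje
      exact hje ▸ List.getElem_mem hjl
  -- whatever boolean is written at idx, it equals (v ≤ m) and the invariant carries over
  have hres : ∀ res : Bool,
      (res = true ↔ v ≤ m) →
      INV rituals m (done ++ [idx]) (PySem.List.pySetD a idx res) := by
    intro res hresiff
    refine ⟨by rw [PySem.List.length_pySetD]; exact hlen, ?_⟩
    intro i hi0 hin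
    rw [pyGetD_pySetD_int a idx i res hidx0 (by omega) hi0]
    by_cases hii : i = idx
    · subst hii
      rw [if_pos rfl]
      rw [hresiff]
      simp [← hv]
    · rw [if_neg hii]
      rw [hget i hi0 hin]
      simp [List.mem_append, hii]
  unfold amStep
  rw [← hv]
  by_cases h1 : v = 1
  · rw [if_pos (by simp [h1])]
    exact hres true (by simp only [true_iff]; omega)
  · rw [if_neg (by simpa using h1)]
    apply hres
    rw [amOk_eq_all, List.all_eq_true]
    constructor
    · intro hall
      by_contra hvm
      push Not at hvm
      have hkm : m ∈ PySem.List.pyRange 1 v 1 := PySem.List.mem_pyRange_one.mpr ⟨hm1, hvm⟩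
      have := hall m hkm
      rw [List.any_eq_true] at this
      obtain ⟨j, hjmem, hj⟩ := this
      rw [PySem.List.mem_pyRange_one] at hjmem
      simp only [Bool.and_eq_true, beq_iff_eq] at hj
      exact hm2 ((hmemidx m).mpr ⟨j, hjmem.1, hjmem.2, hj.1⟩)
    · intro hvm k hk
      rw [PySem.List.mem_pyRange_one] at hk
      have hkm : k < m := by omega
      obtain ⟨j, hj0, hjn, hje⟩ := (hmemidx k).mp (hm3 k hk.1 hkm)
      rw [List.any_eq_true]
      refine ⟨j, PySem.List.mem_pyRange_one.mpr ⟨hj0, hjn⟩, ?_⟩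
      simp only [Bool.and_eq_true, beq_iff_eq]
      refine ⟨hje, ?_⟩
      rw [hget j hj0 hjn]
      exact ⟨hdone_lt j hj0 hjn (by rw [hje]; omega), by rw [hje]; omega⟩

theorem fold_inv (rituals : List Int) (m : Int)
    (hm1 : 1 ≤ m) (hm2 : m ∉ rituals) (hm3 : ∀ k, 1 ≤ k → k < m → k ∈ rituals)
    (done rest : List Int) (a : List Bool)
    (horder : PySem.List.sorted (PySem.List.pyRange 0 (rituals.length : Int) 1)
        (fun i => PySem.List.pyGetD rituals i 0) false = done ++ rest)
    (hinv : INV rituals m done a) :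
    INV rituals m (done ++ rest) (rest.foldl (amStep rituals) a) := by
  induction rest generalizing done a with
  | nil => simpa using hinv
  | cons idx rest ih =>
    have h1 := step_inv rituals m hm1 hm2 hm3 done rest idx horder a hinv
    have h2 := ih (done ++ [idx]) (amStep rituals a idx) (by simpa using horder) h1
    simpa using h2

-- ===== VERDICT (by name: the statement is the Claim_ definition above) =====
theorem active_mask_for_field_spec : Claim_equal_active_mask_for_field := by
  intro rituals _
  unfold Spec_active_mask_for_field active_mask_for_field_alt active_mask_for_field
  simp only []
  set present := PySem.Set.ofList rituals with hpres
  set m := findMex present 1 (present.length + 1) with hm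
  have hfm := findMex_spec present 1 (present.length + 1)
      (Nat.lt_succ_of_le (List.length_filter_le _ present))
  have hmemset : ∀ k : Int, k ∈ present ↔ k ∈ rituals := by
    intro k; rw [hpres]; exact PySem.Set.mem_ofList rituals k
  have hm1 : 1 ≤ m := hfm.1
  have hm2 : m ∉ rituals := fun h => hfm.2.1 ((hmemset m).mpr h)
  have hm3 : ∀ k, 1 ≤ k → k < m → k ∈ rituals :=
    fun k h1 h2 => (hmemset k).mp (hfm.2.2 k h1 h2)
  by_cases h0 : rituals.length = 0
  · rw [if_pos h0]
    rw [List.length_eq_zero_iff.mp h0]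
    rfl
  · rw [if_neg h0]
    have hfin := fold_inv rituals m hm1 hm2 hm3 []
        (PySem.List.sorted (PySem.List.pyRange 0 (rituals.length : Int) 1)
          (fun i => PySem.List.pyGetD rituals i 0) false)
        (List.replicate rituals.length false)
        (by simp)
        (by
          refine ⟨by simp, ?_⟩
          intro i hi0 hin
          rw [PySem.List.pyGetD_of_nonneg _ _ hi0]
          simp [List.getD])
    simp only [List.nil_append] at hfin
    obtain ⟨hflen, hfget⟩ := hfin
    have hperm := PySem.List.sorted_perm (PySem.List.pyRange 0 (rituals.length : Int) 1)
        (fun i => PySem.List.pyGetD rituals i 0) false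
    apply List.ext_getElem
    · rw [hflen, List.length_map]
    · intro i hi1 hi2
      have hi : i < rituals.length := by rwa [hflen] at hi1
      have hgi := hfget (i : Int) (by omega) (by exact_mod_cast hi)
      have hmem : (i : Int) ∈ PySem.List.sorted (PySem.List.pyRange 0 (rituals.length : Int) 1)
          (fun i => PySem.List.pyGetD rituals i 0) false :=
        hperm.mem_iff.mpr (PySem.List.mem_pyRange_one.mpr ⟨by omega, by exact_mod_cast hi⟩)
      rw [PySem.List.pyGetD_of_nonneg _ _ (by omega : (0:Int) ≤ (i : Int))] at hgi
      simp only [Int.toNat_natCast] at hgi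
      rw [List.getD, List.getElem?_eq_getElem hi1, Option.getD_some] at hgi
      have hrit : PySem.List.pyGetD rituals (i : Int) 0 = rituals[i] := by
        rw [PySem.List.pyGetD_of_nonneg _ _ (by omega : (0:Int) ≤ (i : Int))]
        simp [List.getD, List.getElem?_eq_getElem hi]
      rw [List.getElem_map]
      rw [Bool.eq_iff_iff, hgi, decide_eq_true_iff, hrit]
      simp [hmem]
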